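-- pv_equiv track=rewrite | github.com/IvanKalug-QA/codewars | Encrypt_this.py | encrypt_this
-- ===== SOURCE A (Python) =====
-- def encrypt_this(text):
--     if not len(text):
--         return ''
--     l = list()
--     ll = list()
--     for i in text.split():
--         f = i[1] if len(i) > 1 else ''
--         f2 = i[-1] if len(i) > 1 else ''
--         for j in range(len(i)):
--             if j == 0:
--                 ll.append(str(ord(i[j])))
--             elif j == 1:
--                 ll.append(f2)
--             elif j == len(i) - 1:
--                 ll.append(f)
--             else:
--                 ll.append(i[j])
--         l.append(''.join(ll))
--         ll = []
--     return ' '.join(l)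
-- ===== SOURCE B (Python) =====
-- def _enc(w):
--     head = str(ord(w[0]))
--     tail = w[1:]
--     if len(tail) > 1:
--         tail = tail[-1] + tail[1:-1] + tail[0]
--     return head + tail
--
--
-- def encrypt_this(text):
--     return ' '.join(_enc(w) for w in text.split())
-- ===== Notes on version B (the rewrite author's own statement) =====
-- stated objective: simpler
-- what changed: Replaces A's per-character inner loop with its four positional if/elif branches and two accumulator lists by a per-word slicing expression: str(ord(w[0])) + (tail[-1] + tail[1:-1] + tail[0] when the tail has more than one char, else the tail unchanged), joined over text.split().
import Mathlib
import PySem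

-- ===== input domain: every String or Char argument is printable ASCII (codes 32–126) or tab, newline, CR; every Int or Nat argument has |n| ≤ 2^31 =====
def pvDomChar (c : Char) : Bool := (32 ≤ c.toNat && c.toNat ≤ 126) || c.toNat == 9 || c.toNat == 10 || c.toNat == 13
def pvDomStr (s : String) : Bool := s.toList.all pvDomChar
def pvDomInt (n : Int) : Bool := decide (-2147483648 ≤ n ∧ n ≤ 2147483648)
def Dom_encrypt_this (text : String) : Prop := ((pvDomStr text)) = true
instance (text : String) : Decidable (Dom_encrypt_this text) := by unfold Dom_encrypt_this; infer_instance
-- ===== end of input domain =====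

-- B replaces A's per-character index loop (four positional branches) by per-word slicing:
-- head = str(ord(w[0])) and, for a tail longer than one char, tail[-1] + tail[1:-1] + tail[0]  (objective: simpler).

-- ===== PORT A =====
-- A's inner loop body (the four if/elif branches on j); ll is reset per word, so the loop is a per-word helper.
def pvBody (i : List Char) (f f2 : List Char) (ll : List (List Char)) (j : Int) : List (List Char) :=
  if j = 0 then ll ++ [PySem.Int.toChars ((PySem.List.pyGetD i j ' ').toNat : Int)]
  else if j = 1 then ll ++ [f2]
  else if j = (i.length : Int) - 1 then ll ++ [f]
  else ll ++ [[PySem.List.pyGetD i j ' ']]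

def pvAWordA (i : List Char) : List Char :=
  let f : List Char := if 1 < i.length then [PySem.List.pyGetD i 1 ' '] else []
  let f2 : List Char := if 1 < i.length then [PySem.List.pyGetD i (-1) ' '] else []
  PySem.Chars.join [] ((PySem.List.pyRange 0 (i.length : Int) 1).foldl (pvBody i f f2) [])

def encrypt_this (text : String) : String :=
  if PySem.Str.len text = 0 then "" else
    let l : List (List Char) :=
      (PySem.Chars.split₀ text.toList).foldl (fun l i => l ++ [pvAWordA i]) []
    String.ofList (PySem.Chars.join [' '] l)

-- ===== PORT B =====
-- _enc from Source B; w comes from text.split(), hence is nonempty (w[0] cannot raise).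
def pvEncB (w : List Char) : List Char :=
  let head : List Char := PySem.Int.toChars ((PySem.List.pyGetD w 0 ' ').toNat : Int)
  let tail : List Char := PySem.List.slice w (some 1) none
  let tail2 : List Char :=
    if 1 < tail.length then
      [PySem.List.pyGetD tail (-1) ' '] ++ PySem.List.slice tail (some 1) (some (-1))
        ++ [PySem.List.pyGetD tail 0 ' ']
    else tail
  head ++ tail2

def encrypt_this_alt (text : String) : String :=
  String.ofList (PySem.Chars.join [' '] ((PySem.Chars.split₀ text.toList).map pvEncB))

-- ===== PRECONDITION & SPEC =====
def Spec_encrypt_this (text : String) (out : String) : Prop := out = encrypt_this_alt text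
instance (text : String) (out : String) : Decidable (Spec_encrypt_this text out) := by unfold Spec_encrypt_this; infer_instance

-- ===== CLAIM (what is proved, stated in full; the proofs are below) =====
def Claim_equal_encrypt_this : Prop := ∀ (text : String), Dom_encrypt_this text → Spec_encrypt_this text (encrypt_this text)

-- ===== LEMMAS AND PROOFS =====

-- evaluating the loop body on the four kinds of index
lemma pvBody_zero (i : List Char) (f f2 : List Char) (ll : List (List Char)) :
    pvBody i f f2 ll 0 = ll ++ [PySem.Int.toChars ((PySem.List.pyGetD i 0 ' ').toNat : Int)] := by
  simp [pvBody]

lemma pvBody_one (i : List Char) (f f2 : List Char) (ll : List (List Char)) :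
    pvBody i f f2 ll 1 = ll ++ [f2] := by
  simp [pvBody]

lemma pvBody_last (i : List Char) (f f2 : List Char) (ll : List (List Char)) (j : Int)
    (h : 3 ≤ i.length) (hj : j = (i.length : Int) - 1) :
    pvBody i f f2 ll j = ll ++ [f] := by
  subst hj
  unfold pvBody
  rw [if_neg (by omega), if_neg (by omega), if_pos rfl]

lemma pvBody_mid (i : List Char) (f f2 : List Char) (ll : List (List Char)) (j : Int)
    (h2 : 2 ≤ j) (h3 : j < (i.length : Int) - 1) :
    pvBody i f f2 ll j = ll ++ [[PySem.List.pyGetD i j ' ']] := by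
  unfold pvBody
  rw [if_neg (by omega), if_neg (by omega), if_neg (by omega)]

-- join with empty separator is flatten
lemma pv_join_nil_flatten (L : List (List Char)) : PySem.Chars.join [] L = L.flatten := by
  induction L with
  | nil => simp [PySem.Chars.join_nil]
  | cons p rest ih =>
    cases rest with
    | nil => simp [PySem.Chars.join_singleton]
    | cons q rest' =>
      rw [PySem.Chars.join_cons_cons]
      simp [ih]

-- every word produced by str.split() is nonempty
lemma pv_go_ne_nil : ∀ (s cur : List Char) (acc : List (List Char)),
    (∀ w ∈ acc, w ≠ []) → ∀ w ∈ PySem.Chars.split₀.go s cur acc, w ≠ [] := by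
  intro s
  induction s with
  | nil =>
    intro cur acc hacc w hw
    simp only [PySem.Chars.split₀.go] at hw
    split at hw
    · exact hacc w (List.mem_reverse.mp hw)
    · next hcur =>
      rcases List.mem_cons.mp (List.mem_reverse.mp hw) with h | h
      · subst h
        intro hnil
        exact hcur (by simpa [List.isEmpty_iff] using List.reverse_eq_nil_iff.mp hnil)
      · exact hacc w h
  | cons c rest ih =>
    intro cur acc hacc w hw
    simp only [PySem.Chars.split₀.go] at hw
    split at hw
    · split at hw
      · exact ih [] acc hacc w hw
      · next hcur =>
        refine ih [] (cur.reverse :: acc) ?_ w hw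
        intro v hv
        rcases List.mem_cons.mp hv with h | h
        · subst h
          intro hnil
          exact hcur (by simpa [List.isEmpty_iff] using List.reverse_eq_nil_iff.mp hnil)
        · exact hacc v h
    · exact ih (c :: cur) acc hacc w hw

lemma pv_split_ne_nil (s : List Char) : ∀ w ∈ PySem.Chars.split₀ s, w ≠ [] := by
  intro w hw
  exact pv_go_ne_nil s [] [] (by simp) w hw

-- indices mapped over a contiguous range read off a drop/take segment
lemma pv_map_range'_getD (w : List Char) :
    ∀ (m a : Nat), a + m ≤ w.length →
      (List.range' a m).map (fun k => w.getD k ' ') = (w.drop a).take m := by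
  intro m
  induction m with
  | zero => intro a _; simp
  | succ m ih =>
    intro a h
    have ha : a < w.length := by omega
    rw [List.range'_succ, List.map_cons, ih (a + 1) (by omega)]
    rw [List.drop_eq_getElem_cons ha, List.take_succ_cons, List.getD_eq_getElem w ' ' ha]

-- flatten of singletons
lemma pv_flatten_singletons {α : Type} (g : α → Char) (R : List α) :
    (R.map (fun j => [g j])).flatten = R.map g := by
  induction R with
  | nil => rfl
  | cons x xs ih => simp [ih]

-- the per-word computations agree on nonempty words
lemma pv_word_eq : ∀ (w : List Char), w ≠ [] → pvAWordA w = pvEncB w := by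
  intro w hw
  match w with
  | [] => exact absurd rfl hw
  | [a] =>
    simp [pvAWordA, pvEncB, pvBody, PySem.List.pyRange_one, PySem.List.slice_from_one]
  | [a, b] =>
    have em : PySem.List.pyGetD [a, b] (-1) ' ' = b := by
      rw [PySem.List.pyGetD_neg_one _ ' ' (by simp)]
      rfl
    have e0 : PySem.List.pyGetD [a, b] 0 ' ' = a := PySem.List.pyGetD_zero_cons a _ ' '
    unfold pvAWordA pvEncB
    dsimp only
    simp only [List.length_cons, List.length_nil, Nat.reduceAdd, Nat.cast_ofNat]
    have h2' : PySem.List.pyRange 0 (2 : Int) 1 = [0, 1] := by decide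
    rw [h2', List.foldl_cons, List.foldl_cons, List.foldl_nil, pvBody_zero, pvBody_one,
      PySem.List.slice_from_one]
    simp only [List.tail_cons, List.length_cons, List.length_nil, Nat.reduceAdd]
    rw [if_pos (by norm_num), if_neg (by norm_num), em, e0, pv_join_nil_flatten]
    simp
  | a :: b :: c :: rest =>
    have hlen : (a :: b :: c :: rest).length = rest.length + 3 := by simp
    have hLne : (a :: b :: c :: rest) ≠ [] := by simp
    have htne : (b :: c :: rest) ≠ [] := by simp
    have hsplit : PySem.List.pyRange 0 (((rest.length + 3 : Nat) : Int)) 1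
        = 0 :: 1 :: (PySem.List.pyRange 2 (((rest.length + 2 : Nat) : Int)) 1
            ++ [((rest.length + 2 : Nat) : Int)]) := by
      rw [PySem.List.pyRange_one_cons (by push_cast; omega)]
      rw [PySem.List.pyRange_one_cons (by push_cast; omega)]
      have he : ((rest.length + 3 : Nat) : Int) = ((rest.length + 2 : Nat) : Int) + 1 := by
        push_cast; ring
      rw [he, PySem.List.pyRange_one_succ_right (by push_cast; omega)]
      norm_num
    -- scalar entries
    have e0 : PySem.List.pyGetD (a :: b :: c :: rest) 0 ' ' = a :=
      PySem.List.pyGetD_zero_cons a _ ' '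
    have e1 : PySem.List.pyGetD (a :: b :: c :: rest) 1 ' ' = b := by
      have := PySem.List.pyGetD_ofNat (a :: b :: c :: rest) 1 ' ' (by simp)
      simpa using this
    have elast : PySem.List.pyGetD (a :: b :: c :: rest) (-1) ' '
        = (a :: b :: c :: rest).getLast hLne := PySem.List.pyGetD_neg_one _ ' ' hLne
    -- the middle of the range reads off the middle of the word
    have hmid : (PySem.List.pyRange 2 (((rest.length + 2 : Nat) : Int)) 1).map
          (fun j => [PySem.List.pyGetD (a :: b :: c :: rest) j ' '])
        = ((c :: rest).take rest.length).map (fun ch => [ch]) := by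
      have hmid1 : (PySem.List.pyRange 2 (((rest.length + 2 : Nat) : Int)) 1).map
            (fun j => PySem.List.pyGetD (a :: b :: c :: rest) j ' ')
          = (c :: rest).take rest.length := by
        rw [PySem.List.pyRange_one]
        have hn : (((rest.length + 2 : Nat) : Int) - 2).toNat = rest.length := by
          push_cast; omega
        rw [hn, List.map_map]
        have hc : ((fun j => PySem.List.pyGetD (a :: b :: c :: rest) j ' ') ∘ fun k : Nat => (2 : Int) + ↑k)
            = fun k : Nat => (a :: b :: c :: rest).getD (2 + k) ' ' := by
          funext k
          have hck : ((2 : Int) + (k : Int)) = (((2 + k : Nat)) : Int) := by push_cast; ring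
          simp only [Function.comp_apply]
          rw [hck, PySem.List.pyGetD_natCast]
        rw [hc]
        have hr : (List.range rest.length).map (fun k : Nat => (a :: b :: c :: rest).getD (2 + k) ' ')
            = (List.range' 2 rest.length).map (fun k => (a :: b :: c :: rest).getD k ' ') := by
          rw [List.range'_eq_map_range, List.map_map]
          exact (List.map_congr_left (fun k _ => rfl)).symm
        rw [hr, pv_map_range'_getD _ rest.length 2 (by simp only [List.length_cons]; omega)]
        simp
      calc (PySem.List.pyRange 2 (((rest.length + 2 : Nat) : Int)) 1).map
              (fun j => [PySem.List.pyGetD (a :: b :: c :: rest) j ' '])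
          = ((PySem.List.pyRange 2 (((rest.length + 2 : Nat) : Int)) 1).map
              (fun j => PySem.List.pyGetD (a :: b :: c :: rest) j ' ')).map (fun ch => [ch]) := by
            rw [List.map_map]
            rfl
        _ = ((c :: rest).take rest.length).map (fun ch => [ch]) := by rw [hmid1]
    -- A side
    have hA : pvAWordA (a :: b :: c :: rest)
        = PySem.Int.toChars (a.toNat : Int)
            ++ [(a :: b :: c :: rest).getLast hLne]
            ++ (c :: rest).take rest.length ++ [b] := by
      unfold pvAWordA
      dsimp only
      rw [hlen, hsplit, List.foldl_cons, List.foldl_cons, List.foldl_append, List.foldl_cons,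
        List.foldl_nil]
      rw [pvBody_zero, pvBody_one]
      rw [PySem.List.foldl_congr_mem _ _
        (fun acc j => acc ++ [[PySem.List.pyGetD (a :: b :: c :: rest) j ' ']]) _
        (by
          intro acc x hx
          rcases PySem.List.mem_pyRange_one.mp hx with ⟨hx1, hx2⟩
          exact pvBody_mid _ _ _ _ _ hx1 (by rw [hlen]; push_cast; omega))]
      rw [PySem.List.foldl_append_singleton_eq_map]
      rw [pvBody_last _ _ _ _ _ (by rw [hlen]; omega) (by rw [hlen]; push_cast; ring)]
      rw [if_pos (show 1 < rest.length + 3 by omega), if_pos (show 1 < rest.length + 3 by omega)]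
      rw [e0, e1, elast, hmid]
      rw [pv_join_nil_flatten]
      have hflat : (List.map (fun ch => ([ch] : List Char)) (List.take rest.length (c :: rest))).flatten
          = List.take rest.length (c :: rest) := by
        simpa using pv_flatten_singletons (fun ch => ch) (List.take rest.length (c :: rest))
      simp only [List.flatten_cons, List.flatten_append, List.flatten_nil, hflat,
        List.append_nil, List.nil_append, List.append_assoc]
    -- B side
    have hslice : PySem.List.slice (b :: c :: rest) (some 1) (some (-1))
        = (c :: rest).take rest.length := by
      simp only [PySem.List.slice, PySem.List.clampIdx, List.length_cons]
      norm_num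
      rw [if_neg (show ¬((rest.length : Int) + 1 < 0) by omega)]
      omega
    have hB : pvEncB (a :: b :: c :: rest)
        = PySem.Int.toChars (a.toNat : Int)
            ++ ([(a :: b :: c :: rest).getLast hLne]
              ++ (c :: rest).take rest.length ++ [b]) := by
      unfold pvEncB
      dsimp only
      rw [PySem.List.slice_from_one]
      simp only [List.tail_cons]
      rw [if_pos (by simp)]
      rw [PySem.List.pyGetD_neg_one _ ' ' htne, hslice,
        PySem.List.pyGetD_zero_cons, PySem.List.pyGetD_zero_cons]
      rw [List.getLast_cons htne]
    rw [hA, hB]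
    simp [List.append_assoc]

-- ===== VERDICT (by name: the statement is the Claim_ definition above) =====
theorem encrypt_this_spec : Claim_equal_encrypt_this := by
  unfold Claim_equal_encrypt_this
  intro text _
  unfold Spec_encrypt_this encrypt_this encrypt_this_alt
  by_cases h0 : PySem.Str.len text = 0
  · have htl : text.toList = [] := by
      have h1 := PySem.Str.len_eq text
      rw [h0] at h1
      have h2 : text.toList.length = 0 := by exact_mod_cast h1.symm
      exact List.length_eq_zero_iff.mp h2
    simp [htl, PySem.Chars.split₀, PySem.Chars.split₀.go, PySem.Chars.join_nil]
  · rw [if_neg h0]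
    dsimp only
    rw [PySem.List.foldl_append_singleton_eq_map, List.nil_append]
    congr 2
    exact List.map_congr_left (fun w hw => pv_word_eq w (pv_split_ne_nil _ w hw))
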